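-- pv_equiv track=rewrite | github.com/QuirinoC/46Exercises | simpleIO36.py | hapax
-- ===== SOURCE A (Python) =====
-- def hapax(string):
--     frecuency = {}
--     notAcceptedChars = "~!@#$%^&*()_+{}|\":<>?`-=[]\';,./`"
--     hapaxWords = []
--     words = [i.lower() for i in ("".join([i.lower() for i in string if not i in notAcceptedChars])).split()]
--     for word in words:
--         if word in frecuency.keys():
--             frecuency[word] += 1
--         elif word not in frecuency.keys():
--             frecuency[word] = 1
--     for key in frecuency:
--         if frecuency[key] == 1:
--             hapaxWords.append(key)
--     return hapaxWords
-- ===== SOURCE B (Python) =====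
-- def hapax(string):
--     notAcceptedChars = "~!@#$%^&*()_+{}|\":<>?`-=[]\';,./`"
--     words = [i.lower() for i in ("".join([i.lower() for i in string if not i in notAcceptedChars])).split()]
--     seen_once, seen_more = set(), set()
--     for word in words:
--         if word in seen_more:
--             pass
--         elif word in seen_once:
--             seen_once.discard(word)
--             seen_more.add(word)
--         else:
--             seen_once.add(word)
--     return [word for word in words if word in seen_once]
-- ===== Notes on version B (the rewrite author's own statement) =====
-- stated objective: idiomatic
-- what changed: Replaces the frequency dictionary plus a second keys pass with a single pass maintaining two sets (seen_once/seen_more) with promote-on-repeat control flow, then collects the result by rescanning the words list for words still in seen_once.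
import Mathlib
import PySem

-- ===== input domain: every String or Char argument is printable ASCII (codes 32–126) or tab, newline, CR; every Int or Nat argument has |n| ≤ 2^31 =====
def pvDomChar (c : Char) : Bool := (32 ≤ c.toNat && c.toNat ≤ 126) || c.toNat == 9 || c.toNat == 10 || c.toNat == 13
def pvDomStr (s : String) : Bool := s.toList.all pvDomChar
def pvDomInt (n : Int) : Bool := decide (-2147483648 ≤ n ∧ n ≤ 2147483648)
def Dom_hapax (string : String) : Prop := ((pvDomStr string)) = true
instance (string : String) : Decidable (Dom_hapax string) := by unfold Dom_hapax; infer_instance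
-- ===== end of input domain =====

-- B replaces A's frequency dictionary + keys pass with one pass over two sets (seen_once/seen_more)
-- and a rescan of the word list; objective: more idiomatic, same cost.

-- shared module constant of both Pythons
def pvNotAccepted : List Char := "~!@#$%^&*()_+{}|\":<>?`-=[]';,./`".toList

-- ===== PORT A =====
def hapax (string : String) : List String :=
  let words : List String :=
    (PySem.Str.split₀ (String.ofList
      ((string.toList.filter (fun c => !(pvNotAccepted.contains c))).map PySem.Chars.lowerChar))).map
      PySem.Str.lower
  let frecuency : PySem.Dict String Int :=
    words.foldl (fun d word =>
      if d.contains word then d.insert word (d.getD word 0 + 1)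
      else if !(d.contains word) then d.insert word 1
      else d) PySem.Dict.empty
  frecuency.keys.foldl (fun acc key =>
    if frecuency.getD key 0 == 1 then acc ++ [key] else acc) []

-- ===== PORT B =====
def hapax_alt (string : String) : List String :=
  let words : List String :=
    (PySem.Str.split₀ (String.ofList
      ((string.toList.filter (fun c => !(pvNotAccepted.contains c))).map PySem.Chars.lowerChar))).map
      PySem.Str.lower
  let st : PySem.Set String × PySem.Set String :=
    words.foldl (fun st word =>
      if PySem.Set.contains st.2 word then st
      else if PySem.Set.contains st.1 word then
        (PySem.Set.discard st.1 word, PySem.Set.add st.2 word)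
      else (PySem.Set.add st.1 word, st.2)) (PySem.Set.empty, PySem.Set.empty)
  words.filter (fun word => PySem.Set.contains st.1 word)

-- ===== PRECONDITION & SPEC =====
def Spec_hapax (string : String) (out : List String) : Prop := out = hapax_alt string
instance (string : String) (out : List String) : Decidable (Spec_hapax string out) := by unfold Spec_hapax; infer_instance

-- ===== CLAIM (what is proved, stated in full; the proofs are below) =====
def Claim_equal_hapax : Prop := ∀ (string : String), Dom_hapax string → Spec_hapax string (hapax string)

-- ===== LEMMAS AND PROOFS =====

-- A's counting loop is Counter(words)
theorem hapaxA_counter (ws : List String) :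
    ws.foldl (fun (d : PySem.Dict String Int) word =>
      if d.contains word then d.insert word (d.getD word 0 + 1)
      else if !(d.contains word) then d.insert word 1
      else d) PySem.Dict.empty = PySem.Dict.counter ws := by
  rw [← PySem.Dict.foldl_insert_getD_add_one_eq_counter]
  apply PySem.List.foldl_congr_mem
  intro d w _
  by_cases h : d.contains w = true
  · simp [h]
  · simp only [Bool.not_eq_true] at h
    simp [h, PySem.Dict.getD_of_not_contains d 0 h]

-- the dedup-filter bridge: filtering first occurrences by "occurs once" = filtering the list itself
theorem ofList_filter_count (ws : List String) (p : String → Bool)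
    (hp : ∀ w, p w = true → ws.count w ≤ 1) :
    (PySem.Set.ofList ws).filter p = ws.filter p := by
  induction ws with
  | nil => rfl
  | cons x xs ih =>
    rw [PySem.Set.ofList_cons]
    have hcx : (x :: xs).count x = xs.count x + 1 := by simp
    by_cases hpx : p x = true
    · have hx1 : xs.count x = 0 := by
        have := hp x hpx; omega
      have hxnot : x ∉ xs := by
        simpa [List.count_eq_zero] using hx1
      have hdisc : (PySem.Set.ofList xs).discard x = PySem.Set.ofList xs := by
        apply List.filter_eq_self.mpr
        intro y hy
        have : y ∈ xs := (PySem.Set.mem_ofList _ _).mp hy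
        simp only [Bool.not_eq_eq_eq_not, Bool.not_true, beq_eq_false_iff_ne]
        rintro rfl; exact hxnot this
      have ih' := ih (fun w hw => by
        have := hp w hw
        have : xs.count w ≤ (x :: xs).count w := by
          by_cases hwx : w = x <;> simp [hwx, List.count_cons]
        omega)
      simp [hpx, hdisc, ih']
    · have hpx' : p x = false := by simpa using hpx
      have ih' := ih (fun w hw => by
        have := hp w hw
        have : xs.count w ≤ (x :: xs).count w := by
          by_cases hwx : w = x <;> simp [hwx, List.count_cons]
        omega)
      have : ((PySem.Set.ofList xs).discard x).filter p = (PySem.Set.ofList xs).filter p := by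
        unfold PySem.Set.discard
        rw [List.filter_filter]
        apply List.filter_congr
        intro y _
        by_cases hyx : y = x
        · subst hyx; simp [hpx']
        · simp [hyx]
      simp [hpx', this, ih']

-- B's loop invariant: seen_once = words seen exactly once so far, seen_more = seen at least twice
theorem hapaxB_invariant (ws : List String) :
    (∀ w, (w ∈ (ws.foldl (fun (st : PySem.Set String × PySem.Set String) word =>
      if PySem.Set.contains st.2 word then st
      else if PySem.Set.contains st.1 word then
        (PySem.Set.discard st.1 word, PySem.Set.add st.2 word)
      else (PySem.Set.add st.1 word, st.2)) (PySem.Set.empty, PySem.Set.empty)).1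
        ↔ ws.count w = 1) ∧
      (w ∈ (ws.foldl (fun (st : PySem.Set String × PySem.Set String) word =>
      if PySem.Set.contains st.2 word then st
      else if PySem.Set.contains st.1 word then
        (PySem.Set.discard st.1 word, PySem.Set.add st.2 word)
      else (PySem.Set.add st.1 word, st.2)) (PySem.Set.empty, PySem.Set.empty)).2
        ↔ 2 ≤ ws.count w)) := by
  induction ws using List.reverseRecOn with
  | nil => intro w; simp [PySem.Set.empty]
  | append_singleton xs x ih =>
    intro w
    rw [List.foldl_append]
    simp only [List.foldl_cons, List.foldl_nil]
    have h1 := fun w => (ih w).1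
    have h2 := fun w => (ih w).2
    have hcx : (xs ++ [x]).count x = xs.count x + 1 := by simp
    have hcw : ∀ w', w' ≠ x → (xs ++ [x]).count w' = xs.count w' := by
      intro w' hne
      have : List.count w' [x] = 0 := by
        simp [List.count_singleton']
        exact fun e => hne e.symm
      simp [List.count_append, this]
    by_cases hm : PySem.Set.contains (xs.foldl (fun (st : PySem.Set String × PySem.Set String) word =>
      if PySem.Set.contains st.2 word then st
      else if PySem.Set.contains st.1 word then
        (PySem.Set.discard st.1 word, PySem.Set.add st.2 word)
      else (PySem.Set.add st.1 word, st.2)) (PySem.Set.empty, PySem.Set.empty)).2 x = true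
    · have hx2 : 2 ≤ xs.count x := (h2 x).mp ((PySem.Set.contains_iff _ _).mp hm)
      simp only [hm, if_true]
      by_cases hwx : w = x
      · subst hwx
        rw [h1 w, h2 w, hcx]
        exact ⟨⟨fun h => by omega, fun h => by omega⟩, ⟨fun h => by omega, fun h => by omega⟩⟩
      · rw [h1 w, h2 w, hcw w hwx]
        exact ⟨Iff.rfl, Iff.rfl⟩
    · have hm' : x ∉ (xs.foldl (fun (st : PySem.Set String × PySem.Set String) word =>
        if PySem.Set.contains st.2 word then st
        else if PySem.Set.contains st.1 word then
          (PySem.Set.discard st.1 word, PySem.Set.add st.2 word)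
        else (PySem.Set.add st.1 word, st.2)) (PySem.Set.empty, PySem.Set.empty)).2 := by
        intro h; exact hm ((PySem.Set.contains_iff _ _).mpr h)
      have hx2 : ¬ 2 ≤ xs.count x := fun h => hm' ((h2 x).mpr h)
      by_cases ho : PySem.Set.contains (xs.foldl (fun (st : PySem.Set String × PySem.Set String) word =>
        if PySem.Set.contains st.2 word then st
        else if PySem.Set.contains st.1 word then
          (PySem.Set.discard st.1 word, PySem.Set.add st.2 word)
        else (PySem.Set.add st.1 word, st.2)) (PySem.Set.empty, PySem.Set.empty)).1 x = true
      · have hx1 : xs.count x = 1 := (h1 x).mp ((PySem.Set.contains_iff _ _).mp ho)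
        simp only [hm, ho, if_true, Bool.false_eq_true, if_false]
        constructor
        · rw [PySem.Set.mem_discard, h1 w]
          by_cases hwx : w = x
          · subst hwx
            rw [hcx]
            exact ⟨fun ⟨_, h⟩ => absurd rfl h, fun h => by omega⟩
          · rw [hcw w hwx]
            exact ⟨fun ⟨h, _⟩ => h, fun h => ⟨h, hwx⟩⟩
        · rw [PySem.Set.mem_add, h2 w]
          by_cases hwx : w = x
          · subst hwx
            rw [hcx]
            exact ⟨fun _ => by omega, fun _ => Or.inr rfl⟩
          · rw [hcw w hwx]
            exact ⟨fun h => h.elim id (fun e => absurd e hwx), Or.inl⟩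
      · have ho' : x ∉ (xs.foldl (fun (st : PySem.Set String × PySem.Set String) word =>
          if PySem.Set.contains st.2 word then st
          else if PySem.Set.contains st.1 word then
            (PySem.Set.discard st.1 word, PySem.Set.add st.2 word)
          else (PySem.Set.add st.1 word, st.2)) (PySem.Set.empty, PySem.Set.empty)).1 := by
          intro h; exact ho ((PySem.Set.contains_iff _ _).mpr h)
        have hx0 : xs.count x = 0 := by
          have h1' : xs.count x ≠ 1 := fun h => ho' ((h1 x).mpr h)
          omega
        simp only [hm, ho, Bool.false_eq_true, if_false]
        constructor
        · rw [PySem.Set.mem_add, h1 w]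
          by_cases hwx : w = x
          · subst hwx
            rw [hcx]
            exact ⟨fun _ => by omega, fun _ => Or.inr rfl⟩
          · rw [hcw w hwx]
            exact ⟨fun h => h.elim id (fun e => absurd e hwx), Or.inl⟩
        · rw [h2 w]
          by_cases hwx : w = x
          · subst hwx
            rw [hcx]
            exact ⟨fun h => by omega, fun h => by omega⟩
          · rw [hcw w hwx]

-- both pipelines, applied to the same word list, agree
theorem pipelines_eq (ws : List String) :
    (ws.foldl (fun (d : PySem.Dict String Int) word =>
      if d.contains word then d.insert word (d.getD word 0 + 1)
      else if !(d.contains word) then d.insert word 1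
      else d) PySem.Dict.empty).keys.foldl (fun acc key =>
        if (ws.foldl (fun (d : PySem.Dict String Int) word =>
          if d.contains word then d.insert word (d.getD word 0 + 1)
          else if !(d.contains word) then d.insert word 1
          else d) PySem.Dict.empty).getD key 0 == 1 then acc ++ [key] else acc) []
    = ws.filter (fun word => PySem.Set.contains
        (ws.foldl (fun (st : PySem.Set String × PySem.Set String) word =>
          if PySem.Set.contains st.2 word then st
          else if PySem.Set.contains st.1 word then
            (PySem.Set.discard st.1 word, PySem.Set.add st.2 word)
          else (PySem.Set.add st.1 word, st.2)) (PySem.Set.empty, PySem.Set.empty)).1 word) := by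
  rw [hapaxA_counter]
  have hA : (PySem.Dict.counter ws).keys.foldl (fun acc key =>
      if (PySem.Dict.counter ws).getD key 0 == 1 then acc ++ [key] else acc) []
      = (PySem.Set.ofList ws).filter (fun key => ws.count key == 1) := by
    have := PySem.List.foldl_append_if
      (fun key => (PySem.Dict.counter ws).getD key 0 == 1) (fun x => x)
      (PySem.Dict.counter ws).keys []
    rw [this, PySem.Dict.keys_counter]
    simp only [List.map_id_fun', List.nil_append, id]
    apply List.filter_congr
    intro k _
    rw [PySem.Dict.getD_counter]
    by_cases hk : ws.count k = 1
    · simp [hk]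
    · have hki : ¬((ws.count k : Int) = 1) := by exact_mod_cast hk
      simp [hk, hki]
  rw [hA, ofList_filter_count ws _ (fun w hw => by
    have : ws.count w = 1 := by simpa using hw
    omega)]
  apply List.filter_congr
  intro w _
  have h := (hapaxB_invariant ws w).1
  by_cases hc : ws.count w = 1
  · have hct := (PySem.Set.contains_iff _ _).mpr (h.mpr hc)
    rw [hct]
    simp [hc]
  · have hnm : ¬ w ∈ (ws.foldl (fun (st : PySem.Set String × PySem.Set String) word =>
        if PySem.Set.contains st.2 word then st
        else if PySem.Set.contains st.1 word then
          (PySem.Set.discard st.1 word, PySem.Set.add st.2 word)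
        else (PySem.Set.add st.1 word, st.2)) (PySem.Set.empty, PySem.Set.empty)).1 :=
      fun hm => hc (h.mp hm)
    have hct : PySem.Set.contains (ws.foldl (fun (st : PySem.Set String × PySem.Set String) word =>
        if PySem.Set.contains st.2 word then st
        else if PySem.Set.contains st.1 word then
          (PySem.Set.discard st.1 word, PySem.Set.add st.2 word)
        else (PySem.Set.add st.1 word, st.2)) (PySem.Set.empty, PySem.Set.empty)).1 w = false := by
      rw [← Bool.not_eq_true, PySem.Set.contains_iff _ _]
      exact hnm
    rw [hct]
    simp [hc]

-- ===== VERDICT (by name: the statement is the Claim_ definition above) =====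
theorem hapax_spec : Claim_equal_hapax := by
  intro s _
  show hapax s = hapax_alt s
  unfold hapax hapax_alt
  exact pipelines_eq _
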